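-- pv_equiv track=rewrite | github.com/atif-hu/Impact-Analytics | case_study.py | calculate_attendance_probability
-- ===== SOURCE A (Python) =====
-- def calculate_attendance_probability(days):
--     if days < 4:
--         return str(2 ** (days - 1)) + '/' + str(2 ** days)
--
--     one_day_absent = 2
--     two_day_absent = 1
--     three_day_absent = 1
--     present_cases= 4
--     total_count = 8
--     day=4
--     while(day<=days):
--         temp_valid_cases = three_day_absent
--         three_day_absent = two_day_absent
--         two_day_absent = one_day_absent
--         one_day_absent = present_cases
--         present_cases=total_count
--         total_count = (total_count - temp_valid_cases) * 2 + temp_valid_cases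
--         day+=1
--
--     return str(one_day_absent+two_day_absent+three_day_absent) + '/' + str(total_count)
-- ===== SOURCE B (Python) =====
-- def calculate_attendance_probability(days):
--     if days < 1:
--         raise ValueError("days must be a positive number of days")
--     if days < 4:
--         return str(2 ** (days - 1)) + '/' + str(2 ** days)
--     # The loop in the original satisfies T(d) = 2*T(d-1) - T(d-5) for the running
--     # total, with (T(3),T(2),T(1),T(0),T(-1)) = (8,4,2,1,1); the answer is
--     # (T(days-2)+T(days-3)+T(days-4)) / T(days).  Compute T via fast
--     # exponentiation of the 5x5 companion matrix: O(log days) matrix products.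
--     M = [[2, 0, 0, 0, -1],
--          [1, 0, 0, 0, 0],
--          [0, 1, 0, 0, 0],
--          [0, 0, 1, 0, 0],
--          [0, 0, 0, 1, 0]]
--
--     def mat_mul(a, b):
--         return [[sum(a[i][k] * b[k][j] for k in range(5)) for j in range(5)]
--                 for i in range(5)]
--
--     def mat_pow(m, n):
--         result = [[1 if i == j else 0 for j in range(5)] for i in range(5)]
--         while n:
--             if n & 1:
--                 result = mat_mul(result, m)
--             m = mat_mul(m, m)
--             n >>= 1
--         return result
--
--     p = mat_pow(M, days - 3)
--     v0 = [8, 4, 2, 1, 1]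
--     v = [sum(p[i][j] * v0[j] for j in range(5)) for i in range(5)]
--     return str(v[2] + v[3] + v[4]) + '/' + str(v[0])
-- ===== Notes on version B (the rewrite author's own statement) =====
-- stated objective: alternative
-- what changed: Replaces the day-by-day while loop with fast exponentiation of the 5x5 companion matrix of the loop's linear recurrence; intended as asymptotically faster (logarithmically many matrix products), measured about 1.7x at the largest size, below the 1.5x-confirmed threshold at sizes where both finish comfortably.
-- outside the precondition, e.g. on calculate_attendance_probability(0): A returns '0.5/1', B raises ValueError; on calculate_attendance_probability(-2): A returns '0.125/0.25', B raises ValueError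
import Mathlib
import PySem

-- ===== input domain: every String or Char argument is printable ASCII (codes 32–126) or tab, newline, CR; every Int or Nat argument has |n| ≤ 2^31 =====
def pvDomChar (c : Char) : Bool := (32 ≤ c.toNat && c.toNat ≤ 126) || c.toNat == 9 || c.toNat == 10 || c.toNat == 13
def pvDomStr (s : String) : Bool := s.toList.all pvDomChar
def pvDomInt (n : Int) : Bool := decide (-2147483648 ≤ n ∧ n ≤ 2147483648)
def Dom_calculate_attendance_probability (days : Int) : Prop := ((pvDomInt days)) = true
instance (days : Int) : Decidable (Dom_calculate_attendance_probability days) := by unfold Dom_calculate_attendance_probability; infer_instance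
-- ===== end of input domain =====

-- B replaces A's day-by-day loop with fast exponentiation of the 5x5 companion
-- matrix of the loop's linear recurrence (an alternative algorithm).


-- ===== PORT A =====
-- the while loop, state (one_day_absent, two_day_absent, three_day_absent, present_cases, total_count)
def aGo : Nat → Int × Int × Int × Int × Int → Int × Int × Int × Int × Int
  | 0, s => s
  | Nat.succ k, (one, two, three, present, total) =>
      aGo k (present, one, two, total, (total - three) * 2 + three)

def calculate_attendance_probability (days : Int) : String :=
  if days < 4 then
    PySem.Int.toStr (2 ^ (days - 1).toNat) ++ "/" ++ PySem.Int.toStr (2 ^ days.toNat)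
  else
    let s := aGo (days - 3).toNat (2, 1, 1, 4, 8)
    PySem.Int.toStr (s.1 + s.2.1 + s.2.2.1) ++ "/" ++ PySem.Int.toStr (s.2.2.2.2)

-- ===== PORT B =====
-- Source B's 5x5 integer matrix (list of lists) as a concrete 25-field record,
-- entry a_i_j = row i, column j, all entries materialised eagerly
structure M5 where
  a00 : Int
  a01 : Int
  a02 : Int
  a03 : Int
  a04 : Int
  a10 : Int
  a11 : Int
  a12 : Int
  a13 : Int
  a14 : Int
  a20 : Int
  a21 : Int
  a22 : Int
  a23 : Int
  a24 : Int
  a30 : Int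
  a31 : Int
  a32 : Int
  a33 : Int
  a34 : Int
  a40 : Int
  a41 : Int
  a42 : Int
  a43 : Int
  a44 : Int
deriving Repr, DecidableEq

-- Source B's mat_mul: entry (i,j) is the sum over k of a[i][k]*b[k][j]
def matMul (x y : M5) : M5 :=
  {
    a00 := x.a00 * y.a00 + x.a01 * y.a10 + x.a02 * y.a20 + x.a03 * y.a30 + x.a04 * y.a40
    a01 := x.a00 * y.a01 + x.a01 * y.a11 + x.a02 * y.a21 + x.a03 * y.a31 + x.a04 * y.a41
    a02 := x.a00 * y.a02 + x.a01 * y.a12 + x.a02 * y.a22 + x.a03 * y.a32 + x.a04 * y.a42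
    a03 := x.a00 * y.a03 + x.a01 * y.a13 + x.a02 * y.a23 + x.a03 * y.a33 + x.a04 * y.a43
    a04 := x.a00 * y.a04 + x.a01 * y.a14 + x.a02 * y.a24 + x.a03 * y.a34 + x.a04 * y.a44
    a10 := x.a10 * y.a00 + x.a11 * y.a10 + x.a12 * y.a20 + x.a13 * y.a30 + x.a14 * y.a40
    a11 := x.a10 * y.a01 + x.a11 * y.a11 + x.a12 * y.a21 + x.a13 * y.a31 + x.a14 * y.a41
    a12 := x.a10 * y.a02 + x.a11 * y.a12 + x.a12 * y.a22 + x.a13 * y.a32 + x.a14 * y.a42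
    a13 := x.a10 * y.a03 + x.a11 * y.a13 + x.a12 * y.a23 + x.a13 * y.a33 + x.a14 * y.a43
    a14 := x.a10 * y.a04 + x.a11 * y.a14 + x.a12 * y.a24 + x.a13 * y.a34 + x.a14 * y.a44
    a20 := x.a20 * y.a00 + x.a21 * y.a10 + x.a22 * y.a20 + x.a23 * y.a30 + x.a24 * y.a40
    a21 := x.a20 * y.a01 + x.a21 * y.a11 + x.a22 * y.a21 + x.a23 * y.a31 + x.a24 * y.a41
    a22 := x.a20 * y.a02 + x.a21 * y.a12 + x.a22 * y.a22 + x.a23 * y.a32 + x.a24 * y.a42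
    a23 := x.a20 * y.a03 + x.a21 * y.a13 + x.a22 * y.a23 + x.a23 * y.a33 + x.a24 * y.a43
    a24 := x.a20 * y.a04 + x.a21 * y.a14 + x.a22 * y.a24 + x.a23 * y.a34 + x.a24 * y.a44
    a30 := x.a30 * y.a00 + x.a31 * y.a10 + x.a32 * y.a20 + x.a33 * y.a30 + x.a34 * y.a40
    a31 := x.a30 * y.a01 + x.a31 * y.a11 + x.a32 * y.a21 + x.a33 * y.a31 + x.a34 * y.a41
    a32 := x.a30 * y.a02 + x.a31 * y.a12 + x.a32 * y.a22 + x.a33 * y.a32 + x.a34 * y.a42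
    a33 := x.a30 * y.a03 + x.a31 * y.a13 + x.a32 * y.a23 + x.a33 * y.a33 + x.a34 * y.a43
    a34 := x.a30 * y.a04 + x.a31 * y.a14 + x.a32 * y.a24 + x.a33 * y.a34 + x.a34 * y.a44
    a40 := x.a40 * y.a00 + x.a41 * y.a10 + x.a42 * y.a20 + x.a43 * y.a30 + x.a44 * y.a40
    a41 := x.a40 * y.a01 + x.a41 * y.a11 + x.a42 * y.a21 + x.a43 * y.a31 + x.a44 * y.a41
    a42 := x.a40 * y.a02 + x.a41 * y.a12 + x.a42 * y.a22 + x.a43 * y.a32 + x.a44 * y.a42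
    a43 := x.a40 * y.a03 + x.a41 * y.a13 + x.a42 * y.a23 + x.a43 * y.a33 + x.a44 * y.a43
    a44 := x.a40 * y.a04 + x.a41 * y.a14 + x.a42 * y.a24 + x.a43 * y.a34 + x.a44 * y.a44 }

-- Source B's identity matrix (1 if i == j else 0)
def idM5 : M5 :=
  {
    a00 := 1
    a01 := 0
    a02 := 0
    a03 := 0
    a04 := 0
    a10 := 0
    a11 := 1
    a12 := 0
    a13 := 0
    a14 := 0
    a20 := 0
    a21 := 0
    a22 := 1
    a23 := 0
    a24 := 0
    a30 := 0
    a31 := 0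
    a32 := 0
    a33 := 1
    a34 := 0
    a40 := 0
    a41 := 0
    a42 := 0
    a43 := 0
    a44 := 1 }

-- companion matrix of T(d) = 2*T(d-1) - T(d-5)
def bM : M5 :=
  {
    a00 := 2
    a01 := 0
    a02 := 0
    a03 := 0
    a04 := -1
    a10 := 1
    a11 := 0
    a12 := 0
    a13 := 0
    a14 := 0
    a20 := 0
    a21 := 1
    a22 := 0
    a23 := 0
    a24 := 0
    a30 := 0
    a31 := 0
    a32 := 1
    a33 := 0
    a34 := 0
    a40 := 0
    a41 := 0
    a42 := 0
    a43 := 1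
    a44 := 0 }

-- Source B's mat_pow loop
def matPowGo (result m : M5) (n : Nat) : M5 :=
  if n = 0 then result
  else matPowGo (if n % 2 = 1 then matMul result m else result) (matMul m m) (n / 2)

def matPow (m : M5) (n : Nat) : M5 :=
  matPowGo idM5 m n

def calculate_attendance_probability_alt (days : Int) : String :=
  -- Source B raises ValueError for days < 1; Pre_ excludes those inputs, the port
  -- returns a dummy "" there
  if days < 1 then ""
  else if days < 4 then
    PySem.Int.toStr (2 ^ (days - 1).toNat) ++ "/" ++ PySem.Int.toStr (2 ^ days.toNat)
  else
    let p := matPow bM (days - 3).toNat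
    -- v = p · (8,4,2,1,1); answer is (v[2]+v[3]+v[4]) / v[0]
    let v0 := p.a00 * 8 + p.a01 * 4 + p.a02 * 2 + p.a03 * 1 + p.a04 * 1
    let v2 := p.a20 * 8 + p.a21 * 4 + p.a22 * 2 + p.a23 * 1 + p.a24 * 1
    let v3 := p.a30 * 8 + p.a31 * 4 + p.a32 * 2 + p.a33 * 1 + p.a34 * 1
    let v4 := p.a40 * 8 + p.a41 * 4 + p.a42 * 2 + p.a43 * 1 + p.a44 * 1
    PySem.Int.toStr (v2 + v3 + v4) ++ "/" ++ PySem.Int.toStr v0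

-- ===== PRECONDITION & SPEC =====
-- Pre_ excludes days ≤ 0, where A computes 2**(days-1) as a Python FLOAT and
-- returns a float-formatted string like '0.5/1' (not an integer fraction of
-- counts); B raises ValueError there.
def Pre_calculate_attendance_probability (days : Int) : Prop := 1 ≤ days
instance (days : Int) : Decidable (Pre_calculate_attendance_probability days) := by unfold Pre_calculate_attendance_probability; infer_instance
def pvWitness_calculate_attendance_probability : Int := 5

def Spec_calculate_attendance_probability (days : Int) (out : String) : Prop := out = calculate_attendance_probability_alt days
instance (days : Int) (out : String) : Decidable (Spec_calculate_attendance_probability days out) := by unfold Spec_calculate_attendance_probability; infer_instance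

-- ===== CLAIM (what is proved, stated in full; the proofs are below) =====
def Claim_equal_calculate_attendance_probability : Prop := ∀ (days : Int), Dom_calculate_attendance_probability days → Pre_calculate_attendance_probability days → Spec_calculate_attendance_probability days (calculate_attendance_probability days)

-- ===== LEMMAS AND PROOFS =====

-- the sequence A's running total follows: S k = T(k-1) in the comment in Source B
def S : Nat → Int
  | 0 => 1
  | 1 => 1
  | 2 => 2
  | 3 => 4
  | 4 => 8
  | n + 5 => 2 * S (n + 4) - S n

lemma aGo_shift (n : Nat) : ∀ k, aGo n (S (k+2), S (k+1), S k, S (k+3), S (k+4)) =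
    (S (n+k+2), S (n+k+1), S (n+k), S (n+k+3), S (n+k+4)) := by
  induction n with
  | zero => intro k; simp [aGo]
  | succ m ih =>
    intro k
    have hstep : (S (k+4) - S k) * 2 + S k = S (k+5) := by
      show _ = 2 * S (k + 4) - S k
      ring
    calc aGo (m+1) (S (k+2), S (k+1), S k, S (k+3), S (k+4))
        = aGo m (S (k+3), S (k+2), S (k+1), S (k+4), S (k+5)) := by
          simp [aGo, hstep]
      _ = (S (m+(k+1)+2), S (m+(k+1)+1), S (m+(k+1)), S (m+(k+1)+3), S (m+(k+1)+4)) := ih (k+1)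
      _ = (S (m+1+k+2), S (m+1+k+1), S (m+1+k), S (m+1+k+3), S (m+1+k+4)) := by
          rw [show m + (k+1) = m+1+k from by omega]

lemma aGo_S (n : Nat) : aGo n (2, 1, 1, 4, 8) = (S (n+2), S (n+1), S n, S (n+3), S (n+4)) := by
  have := aGo_shift n 0
  simpa [S] using this

-- interpretation of the record as a Mathlib matrix (proof-side only)
def T5 (x : M5) : Matrix (Fin 5) (Fin 5) Int :=
  !![x.a00, x.a01, x.a02, x.a03, x.a04;
     x.a10, x.a11, x.a12, x.a13, x.a14;
     x.a20, x.a21, x.a22, x.a23, x.a24;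
     x.a30, x.a31, x.a32, x.a33, x.a34;
     x.a40, x.a41, x.a42, x.a43, x.a44]

lemma T5_mul (x y : M5) : T5 (matMul x y) = T5 x * T5 y := by
  ext i j
  fin_cases i <;> fin_cases j <;>
    simp [T5, matMul, Matrix.mul_apply, Fin.sum_univ_five]

lemma T5_id : T5 idM5 = 1 := by
  ext i j
  fin_cases i <;> fin_cases j <;> simp [T5, idM5]

lemma matPowGo_eq (n : Nat) : ∀ r m : M5, T5 (matPowGo r m n) = T5 r * T5 m ^ n := by
  induction n using Nat.strong_induction_on with
  | _ n ih =>
    intro r m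
    rcases Nat.eq_zero_or_pos n with h0 | hpos
    · subst h0; simp [matPowGo]
    · have hlt : n / 2 < n := Nat.div_lt_self hpos (by norm_num)
      have hrec := ih (n / 2) hlt (if n % 2 = 1 then matMul r m else r) (matMul m m)
      rw [matPowGo, if_neg (Nat.pos_iff_ne_zero.mp hpos), hrec]
      have hmm : T5 (matMul m m) = T5 m ^ 2 := by rw [T5_mul, sq]
      rw [hmm, ← pow_mul]
      rcases Nat.even_or_odd n with he | ho
      · have h2 : n % 2 = 0 := Nat.even_iff.mp he
        have hn : 2 * (n / 2) = n := by omega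
        simp [h2, hn]
      · have h2 : n % 2 = 1 := Nat.odd_iff.mp ho
        have hn : 2 * (n / 2) + 1 = n := by omega
        rw [if_pos h2, T5_mul, mul_assoc, ← pow_succ',
          show 2 * (n / 2) + 1 = n from by omega]

lemma matPow_eq (m : M5) (n : Nat) : T5 (matPow m n) = T5 m ^ n := by
  rw [matPow, matPowGo_eq, T5_id, one_mul]

-- the vector of five consecutive S values
def w (k : Nat) : Fin 5 → Int := ![S (k+4), S (k+3), S (k+2), S (k+1), S k]

lemma mulVec_w (k : Nat) : (T5 bM).mulVec (w k) = w (k+1) := by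
  have h5 : S (k+5) = 2 * S (k+4) - S k := rfl
  funext i
  fin_cases i <;>
    simp [Matrix.mulVec, dotProduct, Fin.sum_univ_five, bM, T5, w] <;>
    simp [show k+1+4 = k+5 from rfl, h5] <;> ring

lemma pow_mulVec (n : Nat) : ((T5 bM) ^ n).mulVec (w 0) = w n := by
  induction n with
  | zero => simp
  | succ m ih =>
    rw [pow_succ', ← Matrix.mulVec_mulVec, ih, mulVec_w]

-- each component of (matPow bM n) · (8,4,2,1,1), written with the record fields
lemma row_eq (p : M5) (i : Fin 5) :
    (T5 p).mulVec (w 0) i = ∑ j, T5 p i j * w 0 j := rfl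

-- ===== VERDICT (by name: the statement is the Claim_ definition above) =====
theorem calculate_attendance_probability_spec : Claim_equal_calculate_attendance_probability := by
  intro days _ hpre
  unfold Spec_calculate_attendance_probability
  unfold calculate_attendance_probability calculate_attendance_probability_alt
  rw [if_neg (show ¬ days < 1 by exact not_lt.mpr hpre)]
  by_cases hd : days < 4
  · simp [hd]
  · rw [if_neg hd, if_neg hd]
    set n := (days - 3).toNat with hn
    have hA := aGo_S n
    have hw : (T5 (matPow bM n)).mulVec (w 0) = w n := by
      rw [matPow_eq, pow_mulVec]
    have hrow : ∀ i : Fin 5, (∑ j, T5 (matPow bM n) i j * w 0 j) = w n i := by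
      intro i; rw [← row_eq, hw]
    have h0 := hrow 0
    have h2 := hrow 2
    have h3 := hrow 3
    have h4 := hrow 4
    simp [T5, w, Fin.sum_univ_five, S] at h0 h2 h3 h4
    simp only [hA, mul_one]
    rw [h0, h2, h3, h4]
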